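-- pv_equiv track=rewrite | github.com/daveham/imageOne | main.py | image_rect_range
-- ===== SOURCE A (Python) =====
-- def image_rect_range(size, step):
--     top = 0
--     while top <= size[1]:
--         bottom = min(top + step[1], size[1])
--         if top == bottom:
--             break
--         left = 0
--         while left <= size[0]:
--             right = min(left + step[0], size[0])
--             if left == right:
--                 break
--             # left, upper, right, lower
--             yield (left, top, right, bottom)
--             left = right
--         top = bottom
-- ===== SOURCE B (Python) =====
-- def image_rect_range(size, step):
--     w, h = size
--     sx, sy = step
--     if w > 0 and h > 0 and sx > 0 and sy > 0:
--         nrows = -(-h // sy)   # ceiling division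
--         ncols = -(-w // sx)
--         for i in range(nrows):
--             for j in range(ncols):
--                 yield (j * sx, i * sy, min((j + 1) * sx, w), min((i + 1) * sy, h))
-- ===== Notes on version B (the rewrite author's own statement) =====
-- stated objective: alternative
-- what changed: B replaces A's sequential cursor loops (start=end chaining with break-on-empty) by closed-form arithmetic: it computes the tile counts per axis with ceiling division and emits rectangle i,j directly by index as (j*sx, i*sy, min((j+1)*sx,w), min((i+1)*sy,h)).
import Mathlib
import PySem

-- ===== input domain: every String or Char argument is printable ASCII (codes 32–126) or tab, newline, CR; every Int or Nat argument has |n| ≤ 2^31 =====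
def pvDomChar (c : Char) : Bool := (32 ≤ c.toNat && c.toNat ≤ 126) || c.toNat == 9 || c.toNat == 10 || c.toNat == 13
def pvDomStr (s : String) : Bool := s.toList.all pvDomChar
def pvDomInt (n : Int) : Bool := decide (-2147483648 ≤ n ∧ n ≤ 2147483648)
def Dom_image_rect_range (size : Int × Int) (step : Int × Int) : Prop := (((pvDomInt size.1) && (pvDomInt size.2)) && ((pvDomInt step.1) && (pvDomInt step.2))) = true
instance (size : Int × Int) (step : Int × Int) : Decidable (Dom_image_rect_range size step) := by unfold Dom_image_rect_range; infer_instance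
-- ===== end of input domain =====

-- B replaces A's sequential cursor loops by closed-form arithmetic: ceiling-division tile
-- counts per axis and direct index-based emission of each clipped rectangle (objective:
-- alternative; same asymptotic cost).

-- fuel bound for A's while loops (more iterations than any input in Dom ∩ Pre can need;
-- a totality guard only, used by no other definition)
def pvFuel : Nat := 4294967300

-- ===== PORT A =====
-- inner `while left <= size[0]` loop of A (fuel-guarded for totality)
def pvInnerA (sx stx top bottom : Int) : Nat → Int → List (Int × Int × Int × Int)
  | 0, _ => []
  | f + 1, left =>
    if left ≤ sx then
      let right := min (left + stx) sx
      if left = right then []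
      else (left, top, right, bottom) :: pvInnerA sx stx top bottom f right
    else []

-- outer `while top <= size[1]` loop of A
def pvOuterA (size step : Int × Int) : Nat → Int → List (Int × Int × Int × Int)
  | 0, _ => []
  | f + 1, top =>
    if top ≤ size.2 then
      let bottom := min (top + step.2) size.2
      if top = bottom then []
      else pvInnerA size.1 step.1 top bottom pvFuel 0 ++ pvOuterA size step f bottom
    else []

def image_rect_range (size : Int × Int) (step : Int × Int) : List (Int × Int × Int × Int) :=
  pvOuterA size step pvFuel 0

-- ===== PORT B =====
def image_rect_range_alt (size : Int × Int) (step : Int × Int) : List (Int × Int × Int × Int) :=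
  if 0 < size.1 ∧ 0 < size.2 ∧ 0 < step.1 ∧ 0 < step.2 then
    let nrows := -(PySem.Int.floordiv (-size.2) step.2)
    let ncols := -(PySem.Int.floordiv (-size.1) step.1)
    (PySem.List.pyRange 0 nrows 1).flatMap (fun i =>
      (PySem.List.pyRange 0 ncols 1).map (fun j =>
        (j * step.1, i * step.2, min ((j + 1) * step.1) size.1, min ((i + 1) * step.2) size.2)))
  else []

-- ===== PRECONDITION & SPEC =====
-- Pre_ excludes exactly the inputs on which A's generator is infinite (it never finishes):
-- a negative vertical step with nonnegative height, or a negative horizontal step with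
-- positive tiles to emit, make A's cursors decrease forever.
def Pre_image_rect_range (size : Int × Int) (step : Int × Int) : Prop :=
  ¬ (0 ≤ size.2 ∧ (step.2 < 0 ∨ (0 < step.2 ∧ 0 < size.2 ∧ 0 ≤ size.1 ∧ step.1 < 0)))
instance (size : Int × Int) (step : Int × Int) : Decidable (Pre_image_rect_range size step) := by unfold Pre_image_rect_range; infer_instance

def pvWitness_image_rect_range : (Int × Int) × (Int × Int) := ((5, 3), (2, 2))

def Spec_image_rect_range (size : Int × Int) (step : Int × Int) (out : List (Int × Int × Int × Int)) : Prop := out = image_rect_range_alt size step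
instance (size : Int × Int) (step : Int × Int) (out : List (Int × Int × Int × Int)) : Decidable (Spec_image_rect_range size step out) := by unfold Spec_image_rect_range; infer_instance

-- ===== CLAIM (what is proved, stated in full; the proofs are below) =====
def Claim_equal_image_rect_range : Prop := ∀ (size : Int × Int) (step : Int × Int), Dom_image_rect_range size step → Pre_image_rect_range size step → Spec_image_rect_range size step (image_rect_range size step)

-- ===== LEMMAS AND PROOFS =====

-- proof-side helper: the generic 1-D interval recursion shared by A's two loops
def pvAxis (length stp : Int) : Nat → Int → List (Int × Int)
  | 0, _ => []
  | f + 1, start =>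
    if start ≤ length then
      let e := min (start + stp) length
      if start = e then []
      else (start, e) :: pvAxis length stp f e
    else []

-- A's inner loop is the axis recursion for the horizontal axis, decorated with the row bounds.
theorem pvInnerA_eq_axis (sx stx top bottom : Int) :
    ∀ (f : Nat) (left : Int),
      pvInnerA sx stx top bottom f left
        = (pvAxis sx stx f left).map (fun lr => (lr.1, top, lr.2, bottom)) := by
  intro f
  induction f with
  | zero => intro left; rfl
  | succ f ih =>
    intro left
    simp only [pvInnerA, pvAxis]
    split_ifs <;> simp [ih]

-- A's outer loop is the flatMap of the row axis recursion over the (constant) column table.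
theorem pvOuterA_eq (size step : Int × Int) :
    ∀ (f : Nat) (top : Int),
      pvOuterA size step f top
        = (pvAxis size.2 step.2 f top).flatMap
            (fun tb => (pvAxis size.1 step.1 pvFuel 0).map (fun lr => (lr.1, tb.1, lr.2, tb.2))) := by
  intro f
  induction f with
  | zero => intro top; rfl
  | succ f ih =>
    intro top
    simp only [pvOuterA, pvAxis]
    split_ifs <;> simp [ih, pvInnerA_eq_axis]

theorem pvAxis_at_len (length stp : Int) (hs : 0 ≤ stp) :
    ∀ f, pvAxis length stp f length = [] := by
  intro f
  cases f with
  | zero => rfl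
  | succ f =>
    simp only [pvAxis]
    have : min (length + stp) length = length := by omega
    simp [this]

-- ceiling bracket: n = -((-len) // stp) satisfies (n-1)*stp < len ≤ n*stp
theorem pvCeil_bracket (len stp : Int) (hs : 0 < stp) :
    (-(PySem.Int.floordiv (-len) stp) - 1) * stp < len ∧
      len ≤ -(PySem.Int.floordiv (-len) stp) * stp :=
  (PySem.Int.neg_floordiv_neg_eq_iff_of_pos hs).mp rfl

-- closed form for the axis recursion when started at the i-th multiple of a positive step
theorem pvAxis_closed (len stp : Int) (hs : 0 < stp) :
    ∀ (f : Nat) (i : Int), len ≤ i * stp + (f : Int) * stp →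
      pvAxis len stp f (i * stp)
        = (PySem.List.pyRange i (-(PySem.Int.floordiv (-len) stp)) 1).map
            (fun j => (j * stp, min ((j + 1) * stp) len)) := by
  have hbr := pvCeil_bracket len stp hs
  set n := -(PySem.Int.floordiv (-len) stp) with hn
  intro f
  induction f with
  | zero =>
    intro i hle
    simp only [Nat.cast_zero, zero_mul, add_zero] at hle
    have hni : n ≤ i := by nlinarith [hbr.1, hbr.2]
    simp [pvAxis, PySem.List.pyRange_one_eq_nil hni]
  | succ f ih =>
    intro i hle
    rcases lt_trichotomy (i * stp) len with hlt | heq | hgt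
    · -- start < len : emit a tile
      have hin : i < n := by nlinarith [hbr.1, hbr.2]
      have hne : i * stp ≠ min (i * stp + stp) len := by omega
      rw [PySem.List.pyRange_one_cons hin]
      simp only [pvAxis, if_pos (le_of_lt hlt), if_neg hne, List.map_cons]
      by_cases hfit : i * stp + stp ≤ len
      · -- full tile: recurse at (i+1)*stp
        have hmin : min (i * stp + stp) len = (i + 1) * stp := by
          rw [min_eq_left hfit]; ring
        have hm2 : min ((i + 1) * stp) len = (i + 1) * stp := by
          rw [min_eq_left]; nlinarith
        rw [hmin, ih (i + 1) (by push_cast at hle ⊢; linarith), hm2]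
      · -- partial last tile: ends at len, and i+1 = n
        have hmin : min (i * stp + stp) len = len := by omega
        have hle1 : i + 1 ≤ n := by omega
        have hge1 : n ≤ i + 1 := by nlinarith [hbr.1]
        have hn1 : n = i + 1 := le_antisymm hge1 hle1
        have hm2 : min ((i + 1) * stp) len = len := by
          rw [min_eq_right]; nlinarith
        rw [hmin, pvAxis_at_len len stp (le_of_lt hs), hn1,
          PySem.List.pyRange_one_eq_nil (le_refl (i + 1)), hm2]
        simp
    · -- start = len : break, and pyRange i n is empty since n = i
      have h1 : n ≤ i := by nlinarith [hbr.1]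
      rw [heq, pvAxis_at_len len stp (le_of_lt hs), PySem.List.pyRange_one_eq_nil h1]
      simp
    · -- start > len : loop condition fails, and n ≤ i
      have hni : n ≤ i := by nlinarith [hbr.1, hbr.2]
      simp [pvAxis, not_le.mpr hgt, PySem.List.pyRange_one_eq_nil hni]

-- the axis recursion from 0 is empty unless length and step are both positive
-- (needs 0 ≤ stp when 0 ≤ length, which Pre_ provides where it is used)
theorem pvAxis_empty (len stp : Int) (h : ¬ (0 < len ∧ 0 < stp)) (hns : 0 ≤ len → 0 ≤ stp) :
    ∀ f, pvAxis len stp f 0 = [] := by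
  intro f
  cases f with
  | zero => rfl
  | succ f =>
    simp only [pvAxis]
    by_cases hl : (0 : Int) ≤ len
    · have hs := hns hl
      have hm : min stp len = 0 := by
        rcases not_and_or.mp h with h1 | h1 <;> omega
      simp [hl, hm]
    · simp [hl]

-- ===== VERDICT (by name: the statement is the Claim_ definition above) =====
theorem image_rect_range_spec : Claim_equal_image_rect_range := by
  intro size step hdom hpre
  unfold Spec_image_rect_range image_rect_range image_rect_range_alt
  rw [pvOuterA_eq]
  unfold Pre_image_rect_range at hpre
  unfold Dom_image_rect_range at hdom
  simp only [pvDomInt, Bool.and_eq_true, decide_eq_true_eq] at hdom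
  by_cases hpos : 0 < size.1 ∧ 0 < size.2 ∧ 0 < step.1 ∧ 0 < step.2
  · obtain ⟨hw, hh, hsx, hsy⟩ := hpos
    rw [if_pos ⟨hw, hh, hsx, hsy⟩]
    have hrows := pvAxis_closed size.2 step.2 hsy pvFuel 0
      (by simp only [zero_mul, zero_add]; unfold pvFuel; push_cast; nlinarith [hdom.1.2.2, hdom.2.2.1])
    have hcols := pvAxis_closed size.1 step.1 hsx pvFuel 0
      (by simp only [zero_mul, zero_add]; unfold pvFuel; push_cast; nlinarith [hdom.1.1.2, hdom.2.1.1])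
    simp only [zero_mul] at hrows hcols
    rw [hrows, hcols, List.flatMap_map]
    simp only [List.map_map, Function.comp_def]
  · -- some dimension or step nonpositive: both sides are empty
    rw [if_neg hpos]
    by_cases hrowsE : 0 < size.2 ∧ 0 < step.2
    · -- rows exist, so the column axis must be empty
      obtain ⟨hh, hsy⟩ := hrowsE
      have hcolsE : ¬ (0 < size.1 ∧ 0 < step.1) := by tauto
      have hns : (0 : Int) ≤ size.1 → 0 ≤ step.1 := by
        intro h1; by_contra hneg; exact hpre ⟨le_of_lt hh, Or.inr ⟨hsy, hh, h1, by omega⟩⟩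
      rw [pvAxis_empty size.1 step.1 hcolsE hns]
      simp
    · have hns : (0 : Int) ≤ size.2 → 0 ≤ step.2 := by
        intro h2; by_contra hneg; exact hpre ⟨h2, Or.inl (by omega)⟩
      rw [pvAxis_empty size.2 step.2 hrowsE hns]
      rfl
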